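-- pv_equiv track=rewrite | github.com/alexsieusahai/codeforcesSols | 540a.py | possTurns
-- ===== SOURCE A (Python) =====
-- def possTurns(poss0,poss1):
--     pos0 = poss0
--     turns0 = 0
--     pos1 = poss0
--     turns1  = 0
--     while pos0 != poss1:
--         turns0 += 1
--         pos0 += 1
--         if pos0 == 10:
--             pos0 = 0
--     while pos1 != poss1:
--         turns1 +=1
--         pos1 -= 1
--         if pos1 == -1:
--             pos1 = 9
--     return min(turns0,turns1)
-- ===== SOURCE B (Python) =====
-- def possTurns(poss0, poss1):
--     diff = (poss1 - poss0) % 10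
--     return min(diff, 10 - diff)
-- ===== Notes on version B (the rewrite author's own statement) =====
-- stated objective: simpler
-- what changed: Replaced the two stepwise while-loops walking the wheel with direct modular arithmetic: the clockwise distance is (poss1 - poss0) % 10 and the counterclockwise distance is its 10-complement.
import Mathlib
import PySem

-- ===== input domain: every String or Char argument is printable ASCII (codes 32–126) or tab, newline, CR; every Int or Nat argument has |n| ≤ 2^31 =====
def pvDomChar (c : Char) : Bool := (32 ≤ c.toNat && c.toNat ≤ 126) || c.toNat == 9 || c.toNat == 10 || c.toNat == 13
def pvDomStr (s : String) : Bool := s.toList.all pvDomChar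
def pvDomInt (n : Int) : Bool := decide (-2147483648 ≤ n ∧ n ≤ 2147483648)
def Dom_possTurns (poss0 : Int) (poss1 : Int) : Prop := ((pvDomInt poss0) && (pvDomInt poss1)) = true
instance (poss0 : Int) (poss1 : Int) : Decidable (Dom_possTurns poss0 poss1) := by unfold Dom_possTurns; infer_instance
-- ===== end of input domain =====

-- B replaces A's two stepwise wheel-walking loops with a single modular-arithmetic formula (objective: simpler).

-- ===== PORT A =====
-- A's first while loop: step pos upward with wraparound 10 → 0 until it reaches poss1,
-- counting turns. Fueled recursion: under Pre_ at most 9 steps are taken, so fuel 10 is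
-- never exhausted and the port computes exactly A's loop.
def possTurnsUp (poss1 : Int) : Nat → Int → Int → Int
  | 0, _, turns0 => turns0
  | fuel+1, pos0, turns0 =>
      if pos0 = poss1 then turns0
      else
        let t := turns0 + 1
        let p := pos0 + 1
        possTurnsUp poss1 fuel (if p = 10 then 0 else p) t

-- A's second while loop: step pos downward with wraparound -1 → 9 until it reaches poss1.
def possTurnsDown (poss1 : Int) : Nat → Int → Int → Int
  | 0, _, turns1 => turns1
  | fuel+1, pos1, turns1 =>
      if pos1 = poss1 then turns1
      else
        let t := turns1 + 1
        let p := pos1 - 1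
        possTurnsDown poss1 fuel (if p = -1 then 9 else p) t

def possTurns (poss0 : Int) (poss1 : Int) : Int :=
  min (possTurnsUp poss1 10 poss0 0) (possTurnsDown poss1 10 poss0 0)

-- ===== PORT B =====
def possTurns_alt (poss0 : Int) (poss1 : Int) : Int :=
  let diff := PySem.Int.mod (poss1 - poss0) 10
  min diff (10 - diff)

-- ===== PRECONDITION & SPEC =====
-- A's while loops terminate exactly when both positions are digits on the 0-9 wheel,
-- or trivially when the two positions are equal; everywhere else A loops forever.
def Pre_possTurns (poss0 : Int) (poss1 : Int) : Prop :=
  (0 ≤ poss0 ∧ poss0 ≤ 9 ∧ 0 ≤ poss1 ∧ poss1 ≤ 9) ∨ poss0 = poss1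
instance (poss0 : Int) (poss1 : Int) : Decidable (Pre_possTurns poss0 poss1) := by
  unfold Pre_possTurns; infer_instance
def pvWitness_possTurns : Int × Int := (3, 8)

def Spec_possTurns (poss0 : Int) (poss1 : Int) (out : Int) : Prop := out = possTurns_alt poss0 poss1
instance (poss0 : Int) (poss1 : Int) (out : Int) : Decidable (Spec_possTurns poss0 poss1 out) := by unfold Spec_possTurns; infer_instance

-- ===== CLAIM (what is proved, stated in full; the proofs are below) =====
def Claim_equal_possTurns : Prop := ∀ (poss0 : Int) (poss1 : Int), Dom_possTurns poss0 poss1 → Pre_possTurns poss0 poss1 → Spec_possTurns poss0 poss1 (possTurns poss0 poss1)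

-- ===== LEMMAS AND PROOFS =====
theorem possTurns_eq_alt_of_pre (poss0 poss1 : Int)
    (h : Pre_possTurns poss0 poss1) :
    possTurns poss0 poss1 = possTurns_alt poss0 poss1 := by
  rcases h with ⟨h0, h1, h2, h3⟩ | heq
  · interval_cases poss0 <;> interval_cases poss1 <;> decide
  · subst heq
    simp [possTurns, possTurns_alt, possTurnsUp, possTurnsDown, PySem.Int.mod]

-- ===== VERDICT (by name: the statement is the Claim_ definition above) =====
theorem possTurns_spec : Claim_equal_possTurns := by
  intro poss0 poss1 _ hpre
  exact possTurns_eq_alt_of_pre poss0 poss1 hpre
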